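-- pv_equiv track=rewrite | github.com/marcosaraujo2020/ifpi-ads-algoritmos2020 | Lista_Prof_Fabio/Algoritmos_Exercicio-05-VETORES_MATRIZES/fb_ex5_q12.py | soma_demais_valores
-- ===== SOURCE A (Python) =====
-- def diagonal_principal(matriz):
--     soma = 0
--     for i in range(len(matriz)):
--         for j in range(len(matriz[i])):
--             if i == j:
--                 soma += matriz[i][j]
--     return soma
--
-- def diagonal_secundaria(matriz):
--     somatorio = 0
--     for i in range(len(matriz)):
--         for j in range(len(matriz[i])):
--             if i + j == len(matriz)-1:
--                 somatorio += matriz[i][j]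
--     return somatorio
--
-- def soma_demais_valores(matriz):
--     soma_valores = 0
--     for i in range(len(matriz)):
--         for j in range(len(matriz[i])):
--             soma_valores += matriz[i][j]
--
--     dp = diagonal_principal(matriz)
--     ds = diagonal_secundaria(matriz)
--     if len(matriz) % 2 != 0:
--         valor = (len(matriz) - 1) // 2
--         i = j = valor
--         aij = matriz[i][j]
--         soma = dp + ds - aij
--     else:
--         soma = dp + ds
--     resultado = soma_valores - soma
--     return resultado
-- ===== SOURCE B (Python) =====
-- def soma_demais_valores(matriz):
--     n = len(matriz)
--     soma = 0
--     for i, linha in enumerate(matriz):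
--         for j, v in enumerate(linha):
--             if i != j and i + j != n - 1:
--                 soma += v
--     return soma
-- ===== Notes on version B (the rewrite author's own statement) =====
-- stated objective: simpler
-- what changed: B replaces A's four passes (total sum, main-diagonal pass, anti-diagonal pass, odd-dimension centre correction) by one double loop that accumulates only the elements off both diagonals directly.
import Mathlib
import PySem

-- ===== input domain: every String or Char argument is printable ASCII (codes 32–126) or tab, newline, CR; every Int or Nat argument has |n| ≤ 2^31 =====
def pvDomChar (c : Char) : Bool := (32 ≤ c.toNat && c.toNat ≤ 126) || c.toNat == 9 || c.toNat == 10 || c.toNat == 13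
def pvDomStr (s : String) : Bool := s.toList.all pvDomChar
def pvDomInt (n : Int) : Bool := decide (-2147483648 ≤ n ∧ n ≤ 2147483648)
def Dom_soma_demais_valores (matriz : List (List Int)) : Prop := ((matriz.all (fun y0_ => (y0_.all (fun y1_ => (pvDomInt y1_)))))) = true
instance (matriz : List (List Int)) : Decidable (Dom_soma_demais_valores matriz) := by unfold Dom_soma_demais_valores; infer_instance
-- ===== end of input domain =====

-- B replaces A's four passes (total, both diagonal passes, odd-centre correction) by one
-- double loop accumulating only off-diagonal elements; same value wherever A returns.

-- ===== PORT A =====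
def pvDiagonalPrincipal (matriz : List (List Int)) : Int :=
  (List.range matriz.length).foldl (fun soma i =>
    (List.range (matriz.getD i []).length).foldl (fun soma j =>
      if i = j then soma + (matriz.getD i []).getD j 0 else soma) soma) 0

def pvDiagonalSecundaria (matriz : List (List Int)) : Int :=
  (List.range matriz.length).foldl (fun somatorio i =>
    (List.range (matriz.getD i []).length).foldl (fun somatorio (j : Nat) =>
      if ((i : Int)) + ((j : Int)) = (matriz.length : Int) - 1 then
        somatorio + (matriz.getD i []).getD j 0
      else somatorio) somatorio) 0

def soma_demais_valores (matriz : List (List Int)) : Int :=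
  let soma_valores :=
    (List.range matriz.length).foldl (fun s i =>
      (List.range (matriz.getD i []).length).foldl (fun s j =>
        s + (matriz.getD i []).getD j 0) s) 0
  let dp := pvDiagonalPrincipal matriz
  let ds := pvDiagonalSecundaria matriz
  let soma :=
    if matriz.length % 2 ≠ 0 then
      -- valor = (len(matriz)-1)//2 on a Nat ≥ 0: Nat division matches Python's //
      let valor := (matriz.length - 1) / 2
      -- matriz[valor][valor]: getD is exact here because Pre_ puts the index in range
      dp + ds - (matriz.getD valor []).getD valor 0
    else dp + ds
  soma_valores - soma

-- ===== PORT B =====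
def soma_demais_valores_alt (matriz : List (List Int)) : Int :=
  let n := matriz.length
  (PySem.List.enumerate matriz).foldl (fun soma p =>
    (PySem.List.enumerate p.2).foldl (fun soma q =>
      if p.1 ≠ q.1 ∧ p.1 + q.1 ≠ (n : Int) - 1 then soma + q.2 else soma) soma) 0

-- ===== PRECONDITION & SPEC =====
-- Pre_ excludes exactly the inputs where A raises IndexError: odd length with a centre row too
-- short for matriz[centro][centro] (jagged matrices); A returns on everything else.
def Pre_soma_demais_valores (matriz : List (List Int)) : Prop :=
  matriz.length % 2 = 0 ∨
    (matriz.length - 1) / 2 < (matriz.getD ((matriz.length - 1) / 2) []).length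
instance (matriz : List (List Int)) : Decidable (Pre_soma_demais_valores matriz) := by
  unfold Pre_soma_demais_valores; infer_instance

def pvWitness_soma_demais_valores : List (List Int) := [[1, 2], [3, 4]]

def Spec_soma_demais_valores (matriz : List (List Int)) (out : Int) : Prop :=
  out = soma_demais_valores_alt matriz
instance (matriz : List (List Int)) (out : Int) : Decidable (Spec_soma_demais_valores matriz out) := by
  unfold Spec_soma_demais_valores; infer_instance

-- ===== CLAIM (what is proved, stated in full; the proofs are below) =====
def Claim_equal_soma_demais_valores : Prop :=
  ∀ (matriz : List (List Int)), Dom_soma_demais_valores matriz →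
    Pre_soma_demais_valores matriz →
    Spec_soma_demais_valores matriz (soma_demais_valores matriz)

-- ===== LEMMAS AND PROOFS =====

-- proof-side row sums (over zipIdx): total, main diagonal, anti diagonal, B's off-diagonal, both-diagonals
def pvT (l : List Int) : Int := (l.zipIdx.map (fun q => q.1)).sum
def pvDP (i : Nat) (l : List Int) : Int :=
  (l.zipIdx.map (fun q => if q.2 = i then q.1 else 0)).sum
def pvDS (n i : Nat) (l : List Int) : Int :=
  (l.zipIdx.map (fun q => if (i : Int) + (q.2 : Int) = (n : Int) - 1 then q.1 else 0)).sum
def pvRB (n i : Nat) (l : List Int) : Int :=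
  (l.zipIdx.map (fun q => if (i : Int) ≠ (q.2 : Int) ∧ (i : Int) + (q.2 : Int) ≠ (n : Int) - 1 then q.1 else 0)).sum
def pvBoth (n i : Nat) (l : List Int) : Int :=
  (l.zipIdx.map (fun q => if q.2 = i ∧ (i : Int) + (q.2 : Int) = (n : Int) - 1 then q.1 else 0)).sum

lemma pv_foldl_if_add {α : Type} (l : List α) (c : α → Prop) [DecidablePred c]
    (v : α → Int) (s : Int) :
    l.foldl (fun s x => if c x then s + v x else s) s
      = s + (l.map (fun x => if c x then v x else 0)).sum := by
  rw [show (fun (s : Int) x => if c x then s + v x else s)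
        = (fun s x => s + if c x then v x else 0) from by
      funext s x; split <;> simp]
  exact PySem.List.foldl_add l _ s

lemma pv_map_range {α β : Type} (d : α) (f : Nat → α → β) :
    ∀ (l : List α) (k : Nat),
      (List.range l.length).map (fun i => f (i + k) (l.getD i d))
        = (l.zipIdx k).map (fun q => f q.2 q.1) := by
  intro l
  induction l with
  | nil => intro k; simp
  | cons a t ih =>
    intro k
    simp only [List.length_cons, List.range_succ_eq_map, List.map_cons, List.map_map,
      List.zipIdx_cons]
    refine congr_arg₂ List.cons (by simp) ?_
    rw [show ((fun i => f (i + k) ((a :: t).getD i d)) ∘ Nat.succ)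
            = (fun i => f (i + (k + 1)) (t.getD i d)) from by
          funext i
          simp only [Function.comp, List.getD_cons_succ]
          congr 1
          omega]
    exact ih (k + 1)

lemma pv_map_range0 {α β : Type} (d : α) (f : Nat → α → β) (l : List α) :
    (List.range l.length).map (fun i => f i (l.getD i d))
      = l.zipIdx.map (fun q => f q.2 q.1) := by
  have h := pv_map_range d f l 0
  simpa using h

lemma pv_sum_single {α : Type} (g : α → Int) (i : Nat) :
    ∀ (l : List α) (k : Nat),
      ((l.zipIdx k).map (fun q => if q.2 = i then g q.1 else 0)).sum
        = if k ≤ i then ((l[i - k]?).map g).getD 0 else 0 := by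
  intro l
  induction l with
  | nil => intro k; simp
  | cons a t ih =>
    intro k
    simp only [List.zipIdx_cons, List.map_cons, List.sum_cons, ih (k + 1)]
    by_cases hk : k = i
    · subst hk
      simp
    · by_cases hk2 : k ≤ i
      · have h1 : k + 1 ≤ i := by omega
        have h2 : i - k = (i - (k + 1)) + 1 := by omega
        simp [hk, hk2, h1, h2]
      · simp [hk, hk2, show ¬ (k + 1 ≤ i) from by omega]

lemma pv_sum_split {α : Type} (l : List α) (f1 f2 f3 f4 : α → Int) :
    (l.map (fun x => f1 x - f2 x - f3 x + f4 x)).sum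
      = (l.map f1).sum - (l.map f2).sum - (l.map f3).sum + (l.map f4).sum := by
  induction l with
  | nil => simp
  | cons a t ih => simp [ih]; ring

lemma pv_A_eq (m : List (List Int)) :
    soma_demais_valores m =
      (m.zipIdx.map (fun p => pvT p.1)).sum
        - ((m.zipIdx.map (fun p => pvDP p.2 p.1)).sum
          + (m.zipIdx.map (fun p => pvDS m.length p.2 p.1)).sum
          - (if m.length % 2 ≠ 0 then
              (m.getD ((m.length - 1) / 2) []).getD ((m.length - 1) / 2) 0
            else 0)) := by
  unfold soma_demais_valores pvDiagonalPrincipal pvDiagonalSecundaria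
  simp only []
  rw [PySem.List.foldl_congr_mem _ _
      (fun s i => s + ((List.range ((m.getD i []).length)).map
        (fun j => (m.getD i []).getD j 0)).sum) 0
      (fun acc i _ => PySem.List.foldl_add _ _ acc)]
  rw [PySem.List.foldl_congr_mem _ _
      (fun s i => s + ((List.range ((m.getD i []).length)).map
        (fun j => if i = j then (m.getD i []).getD j 0 else 0)).sum) 0
      (fun acc i _ => pv_foldl_if_add _ _ _ acc)]
  rw [PySem.List.foldl_congr_mem _ _
      (fun s i => s + ((List.range ((m.getD i []).length)).map
        (fun (j : Nat) => if ((i : Int)) + ((j : Int)) = (m.length : Int) - 1 then (m.getD i []).getD j 0 else 0)).sum) 0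
      (fun acc i _ => pv_foldl_if_add _ _ _ acc)]
  rw [PySem.List.foldl_add, PySem.List.foldl_add, PySem.List.foldl_add]
  rw [pv_map_range0 ([] : List Int)
      (fun _ l => ((List.range l.length).map (fun j => l.getD j 0)).sum) m]
  rw [pv_map_range0 ([] : List Int)
      (fun i l => ((List.range l.length).map (fun j => if i = j then l.getD j 0 else 0)).sum) m]
  rw [pv_map_range0 ([] : List Int)
      (fun i l => ((List.range l.length).map
        (fun (j : Nat) => if ((i : Int)) + ((j : Int)) = (m.length : Int) - 1 then l.getD j 0 else 0)).sum) m]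
  rw [List.map_congr_left (l := m.zipIdx)
      (f := fun q => ((List.range q.1.length).map (fun j => q.1.getD j 0)).sum)
      (g := fun p => pvT p.1) (fun p _ => by
    beta_reduce
    unfold pvT
    rw [pv_map_range0 (0 : Int) (fun _ x => x) p.1])]
  rw [List.map_congr_left (l := m.zipIdx)
      (f := fun q => ((List.range q.1.length).map (fun j => if q.2 = j then q.1.getD j 0 else 0)).sum)
      (g := fun p => pvDP p.2 p.1) (fun p _ => by
    beta_reduce
    unfold pvDP
    rw [pv_map_range0 (0 : Int) (fun j x => if p.2 = j then x else 0) p.1]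
    exact congrArg List.sum (List.map_congr_left
      (fun q _ => by split_ifs <;> first | rfl | omega)))]
  rw [List.map_congr_left (l := m.zipIdx)
      (f := fun q => ((List.range q.1.length).map
        (fun (j : Nat) => if ((q.2 : Int)) + ((j : Int)) = (m.length : Int) - 1 then q.1.getD j 0 else 0)).sum)
      (g := fun p => pvDS m.length p.2 p.1) (fun p _ => by
    beta_reduce
    unfold pvDS
    rw [pv_map_range0 (0 : Int)
      (fun j x => if ((p.2 : Int)) + ((j : Int)) = (m.length : Int) - 1 then x else 0) p.1])]
  by_cases hpar : m.length % 2 ≠ 0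
  · simp only [if_pos hpar]
    ring
  · simp only [if_neg hpar]
    ring

lemma pv_B_eq (m : List (List Int)) :
    soma_demais_valores_alt m = (m.zipIdx.map (fun p => pvRB m.length p.2 p.1)).sum := by
  unfold soma_demais_valores_alt
  simp only [PySem.List.enumerate_eq_zipIdx_map, List.foldl_map]
  rw [PySem.List.foldl_congr_mem _ _ (fun acc p => acc + pvRB m.length p.2 p.1) 0 ?_]
  · rw [PySem.List.foldl_add]
    simp
  · intro acc p _
    rw [pv_foldl_if_add]
    congr 1
    unfold pvRB
    refine congrArg List.sum (List.map_congr_left ?_)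
    intro q _
    simp

lemma pv_row_id (n i : Nat) (l : List Int) :
    pvRB n i l = pvT l - pvDP i l - pvDS n i l + pvBoth n i l := by
  unfold pvRB pvT pvDP pvDS pvBoth
  rw [← pv_sum_split]
  refine congrArg List.sum (List.map_congr_left ?_)
  intro q _
  split_ifs <;> omega

lemma pv_both_row (n i : Nat) (l : List Int) :
    pvBoth n i l = if 2 * i + 1 = n then ((l[i]?).map (fun x => x)).getD 0 else 0 := by
  unfold pvBoth
  by_cases h : 2 * i + 1 = n
  · rw [if_pos h,
      List.map_congr_left (l := l.zipIdx)
        (g := fun q => if q.2 = i then (fun x => x) q.1 else 0)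
        (fun q _ => by beta_reduce; split_ifs <;> first | rfl | omega)]
    have hs := pv_sum_single (fun x => x) i l 0
    simpa using hs
  · rw [if_neg h,
      List.map_congr_left (l := l.zipIdx) (g := fun _ => (0 : Int))
        (fun q _ => by rw [if_neg]; rintro ⟨h1, h2⟩; omega)]
    simp

-- ===== VERDICT (by name: the statement is the Claim_ definition above) =====
theorem soma_demais_valores_spec : Claim_equal_soma_demais_valores := by
  intro m _ hpre
  unfold Spec_soma_demais_valores
  rw [pv_A_eq, pv_B_eq]
  rw [List.map_congr_left (l := m.zipIdx)
      (f := fun p => pvRB m.length p.2 p.1)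
      (g := fun p => pvT p.1 - pvDP p.2 p.1 - pvDS m.length p.2 p.1 + pvBoth m.length p.2 p.1)
      (fun p _ => pv_row_id m.length p.2 p.1)]
  rw [pv_sum_split]
  rw [List.map_congr_left (l := m.zipIdx)
      (f := fun p => pvBoth m.length p.2 p.1)
      (g := fun p => if 2 * p.2 + 1 = m.length then ((p.1[p.2]?).map (fun x => x)).getD 0 else 0)
      (fun p _ => pv_both_row m.length p.2 p.1)]
  by_cases hodd : m.length % 2 = 0
  · rw [List.map_congr_left (l := m.zipIdx)
        (g := fun _ => (0 : Int)) (fun p _ => if_neg (by omega))]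
    have hne : ¬ (m.length % 2 ≠ 0) := by omega
    simp only [if_neg hne]
    simp
    ring
  · have hmc : (m.length - 1) / 2 < m.length := by omega
    have hcl : (m.length - 1) / 2 < (m.getD ((m.length - 1) / 2) []).length :=
      hpre.resolve_left (by omega)
    rw [List.map_congr_left (l := m.zipIdx)
        (f := fun p => if 2 * p.2 + 1 = m.length then ((p.1[p.2]?).map (fun x => x)).getD 0 else 0)
        (g := fun p => if p.2 = (m.length - 1) / 2 then
          (fun l => ((l[(m.length - 1) / 2]?).map (fun x => x)).getD 0) p.1 else 0)
        (fun p _ => by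
          beta_reduce
          by_cases h : 2 * p.2 + 1 = m.length
          · have hp2 : p.2 = (m.length - 1) / 2 := by omega
            rw [if_pos h, if_pos hp2, hp2]
          · rw [if_neg h, if_neg (by omega)])]
    rw [pv_sum_single (fun l => ((l[(m.length - 1) / 2]?).map (fun x => x)).getD 0)
        ((m.length - 1) / 2) m 0]
    simp only [Nat.zero_le, if_pos, Nat.sub_zero]
    rw [List.getElem?_eq_getElem hmc]
    have hrow : m.getD ((m.length - 1) / 2) [] = m[(m.length - 1) / 2] :=
      List.getD_eq_getElem m [] hmc
    rw [hrow] at hcl ⊢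
    simp only [Option.map_some, Option.getD_some]
    rw [List.getElem?_eq_getElem hcl]
    have hpar : m.length % 2 ≠ 0 := by omega
    simp only [if_pos hpar, Option.map_some, Option.getD_some]
    rw [List.getD_eq_getElem _ 0 hcl]
    ring
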